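-- pv_equiv track=rewrite | github.com/greetingromansoldier/bootdev-task-archive | bootdev-backend-course/bootdev-python-main/ch_8_Loops/L_10_While/main.py | regenerate
-- ===== SOURCE A (Python) =====
-- def regenerate(current_health, max_health, enemy_distance):
--     while enemy_distance > 3:
--         if current_health < max_health:
--             current_health += 1
--             enemy_distance -= 2
--         else:
--             break
--     return current_health
-- ===== SOURCE B (Python) =====
-- def regenerate(current_health, max_health, enemy_distance):
--     # closed form: number of loop iterations = min(ceil((dist-3)/2) clamped at 0, missing health clamped at 0)
--     steps_distance = max(0, -(-(enemy_distance - 3) // 2))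
--     steps_health = max(0, max_health - current_health)
--     return current_health + min(steps_distance, steps_health)
-- ===== Notes on version B (the rewrite author's own statement) =====
-- stated objective: faster
-- what changed: Replaces the step-by-step while loop with a closed-form count of iterations: min(ceil((distance-3)/2), missing health), each clamped at 0.
import Mathlib
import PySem

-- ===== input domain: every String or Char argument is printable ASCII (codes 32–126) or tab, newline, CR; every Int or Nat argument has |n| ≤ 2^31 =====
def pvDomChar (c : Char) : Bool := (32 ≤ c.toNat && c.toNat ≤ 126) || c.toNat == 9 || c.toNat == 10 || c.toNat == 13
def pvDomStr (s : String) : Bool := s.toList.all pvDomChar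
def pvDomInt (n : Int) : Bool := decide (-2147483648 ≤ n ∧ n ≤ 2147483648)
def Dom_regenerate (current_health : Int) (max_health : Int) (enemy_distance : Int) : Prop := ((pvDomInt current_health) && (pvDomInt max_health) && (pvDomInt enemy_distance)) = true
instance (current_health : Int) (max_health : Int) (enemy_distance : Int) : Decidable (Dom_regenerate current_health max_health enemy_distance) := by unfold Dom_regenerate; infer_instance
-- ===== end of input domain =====

-- B replaces A's step-by-step while loop by a closed-form iteration count (objective: faster, O(1) vs O(distance)).

-- ===== PORT A =====
-- the while loop of A: while enemy_distance > 3: if current_health < max_health: ... else: break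
def regenerateLoop (current_health : Int) (max_health : Int) (enemy_distance : Int) : Int :=
  if h : enemy_distance > 3 then
    if current_health < max_health then
      regenerateLoop (current_health + 1) max_health (enemy_distance - 2)
    else
      current_health
  else
    current_health
termination_by (enemy_distance - 3).toNat
decreasing_by omega

def regenerate (current_health : Int) (max_health : Int) (enemy_distance : Int) : Int :=
  regenerateLoop current_health max_health enemy_distance

-- ===== PORT B =====
def regenerate_alt (current_health : Int) (max_health : Int) (enemy_distance : Int) : Int :=
  let steps_distance := max 0 (-(PySem.Int.floordiv (-(enemy_distance - 3)) 2))
  let steps_health := max 0 (max_health - current_health)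
  current_health + min steps_distance steps_health

-- ===== PRECONDITION & SPEC =====
def Spec_regenerate (current_health : Int) (max_health : Int) (enemy_distance : Int) (out : Int) : Prop := out = regenerate_alt current_health max_health enemy_distance
instance (current_health : Int) (max_health : Int) (enemy_distance : Int) (out : Int) : Decidable (Spec_regenerate current_health max_health enemy_distance out) := by unfold Spec_regenerate; infer_instance

-- ===== CLAIM (what is proved, stated in full; the proofs are below) =====
def Claim_equal_regenerate : Prop := ∀ (current_health : Int) (max_health : Int) (enemy_distance : Int), Dom_regenerate current_health max_health enemy_distance → Spec_regenerate current_health max_health enemy_distance (regenerate current_health max_health enemy_distance)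

-- ===== LEMMAS AND PROOFS =====
theorem regenerateLoop_closed (c m d : Int) :
    regenerateLoop c m d = c + min (max 0 (-(PySem.Int.floordiv (-(d - 3)) 2))) (max 0 (m - c)) := by
  have key : ∀ a : Int, (-(PySem.Int.floordiv (-a) 2) - 1) * 2 < a ∧ a ≤ -(PySem.Int.floordiv (-a) 2) * 2 :=
    fun a => (PySem.Int.neg_floordiv_neg_eq_iff_of_pos (by norm_num)).mp rfl
  fun_induction regenerateLoop c m d with
  | case1 c d hd hcm ih =>
    rw [ih]
    have e1 := key (d - 3)
    have e2 := key (d - 2 - 3)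
    omega
  | case2 c d hd hcm =>
    have e1 := key (d - 3)
    omega
  | case3 c d hd =>
    have e1 := key (d - 3)
    omega

-- ===== VERDICT (by name: the statement is the Claim_ definition above) =====
theorem regenerate_spec : Claim_equal_regenerate := by
  intro c m d _
  unfold Spec_regenerate regenerate regenerate_alt
  exact regenerateLoop_closed c m d
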